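-- pv_equiv track=rewrite | github.com/MrSenko/strazar | strazar/__init__.py | calculate_new_travis_env
-- ===== SOURCE A (Python) =====
-- from itertools import product
--
-- def calculate_new_travis_env(groups):
--     """
--         Rebuilds the environment matrix as Cartesian product of all
--         environment variables (aka packages) and their values (aka versions)
--
--         NOTE: only takes into account variables which are listed on that
--         particular line!
--     """
--     # each element of new_env is single combination of all packages and
--     # versions. this represents one line in the travis environment
--     new_env = []
--
--     for pkgs in groups:
--         # each element of intermediate is the product (aka combinations) of
--         # all versions for a particular package
--         _keys = groups[pkgs].keys()
--         _keys = sorted(_keys)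
--         intermediate = [product([key], groups[pkgs][key]) for key in _keys]
--
--         # add the new env lines to the list
--         for p in list(product(*intermediate)):
--             new_env.append(' '.join(["%s=%s" % (k, v) for k, v in list(p)]))
--         new_env.sort()
--
--     return new_env
-- ===== SOURCE B (Python) =====
-- def calculate_new_travis_env(groups):
--     """Same result as A: every line of the Travis env matrix, sorted.
--
--     Different algorithmic shape: no itertools.product, no token lists and no
--     join -- each group's lines are built by structural recursion over its
--     sorted items, extending shared suffix strings directly; the collected
--     lines are sorted once at the end instead of after every group."""
--     def lines(items):
--         if not items:
--             return ['']
--         key, vals = items[0]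
--         rest = lines(items[1:])
--         return ['%s=%s' % (key, v) + (' ' + r if r else '') for v in vals for r in rest]
--
--     out = []
--     for pkg_dict in groups.values():
--         out.extend(lines(sorted(pkg_dict.items(), key=lambda kv: kv[0])))
--     return sorted(out)
-- ===== Notes on version B (the rewrite author's own statement) =====
-- stated objective: alternative
-- what changed: Drops itertools.product, token lists, join and the per-group re-sort: each group's lines are built by structural recursion over the sorted items, gluing 'key=value' onto shared suffix strings, and the whole list is sorted once at the end.
import Mathlib
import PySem

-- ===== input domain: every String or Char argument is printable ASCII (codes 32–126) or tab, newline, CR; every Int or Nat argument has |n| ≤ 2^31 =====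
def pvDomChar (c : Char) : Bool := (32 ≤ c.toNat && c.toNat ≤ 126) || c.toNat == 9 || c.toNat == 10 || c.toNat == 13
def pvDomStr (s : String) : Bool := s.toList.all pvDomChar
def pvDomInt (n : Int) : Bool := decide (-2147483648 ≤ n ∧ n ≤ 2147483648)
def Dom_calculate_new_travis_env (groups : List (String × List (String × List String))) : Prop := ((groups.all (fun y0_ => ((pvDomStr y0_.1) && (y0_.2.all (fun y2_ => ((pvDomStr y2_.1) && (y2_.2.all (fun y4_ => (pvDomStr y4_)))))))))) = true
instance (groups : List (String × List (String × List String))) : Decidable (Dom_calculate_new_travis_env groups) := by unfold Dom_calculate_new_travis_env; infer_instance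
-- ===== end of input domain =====

-- B builds each group's lines by structural recursion over the sorted items, gluing "key=value"
-- onto shared suffix strings directly (no product iterator, no token lists, no join) and sorts
-- the collected lines once at the end instead of after every group (objective: alternative).


-- "%s=%s" % (k, v)  (pure concatenation; used by both Pythons)
def pvFmt (k v : String) : String := PySem.Str.join "" [k, "=", v]

-- ===== PORT A =====
-- groups[pkgs][key]  (dict lookup; inner keys are Nodup under Pre_, so first match = the value)
def pvGetItem (d : List (String × List String)) (k : String) : List String :=
  ((d.find? (fun p => p.1 == k)).map (·.2)).getD []

-- list(product(*intermediate)) : itertools.product, rightmost factor varies fastest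
def pvProduct (ls : List (List (String × String))) : List (List (String × String)) :=
  ls.foldl (fun acc l => acc.flatMap (fun c => l.map (fun x => c ++ [x]))) [[]]

def calculate_new_travis_env (groups : List (String × List (String × List String))) : List String :=
  groups.foldl (fun new_env g =>
    let keys := PySem.List.sorted (g.2.map (·.1)) id
    let intermediate := keys.map (fun k => (pvGetItem g.2 k).map (fun v => (k, v)))
    let lines := (pvProduct intermediate).map
      (fun p => PySem.Str.join " " (p.map (fun kv => pvFmt kv.1 kv.2)))
    PySem.List.sorted (new_env ++ lines) id) []

-- ===== PORT B =====
-- lines(items): structural recursion; '... + (' ' + r if r else '')' gluing onto suffix strings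
def pvLines : List (String × List String) → List String
  | [] => [""]
  | p :: rest =>
    let r := pvLines rest
    p.2.flatMap (fun v => r.map (fun s =>
      PySem.Str.join "" [pvFmt p.1 v, if s = "" then "" else PySem.Str.join "" [" ", s]]))

def calculate_new_travis_env_alt (groups : List (String × List (String × List String))) : List String :=
  PySem.List.sorted
    (groups.foldl (fun out g => out ++ pvLines (PySem.List.sorted g.2 (·.1))) []) id

-- ===== PRECONDITION & SPEC =====
-- Pre_ excludes association lists with a duplicated outer or inner key: those encode no Python
-- dict (dict keys are unique), so A's collapsed-dict behaviour on them is accidental.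
def Pre_calculate_new_travis_env (groups : List (String × List (String × List String))) : Prop :=
  (groups.map (·.1)).Nodup ∧ ∀ g ∈ groups, (g.2.map (·.1)).Nodup
instance (groups : List (String × List (String × List String))) : Decidable (Pre_calculate_new_travis_env groups) := by unfold Pre_calculate_new_travis_env; infer_instance
def pvWitness_calculate_new_travis_env : (List (String × List (String × List String))) :=
  [("pkg", [("b", ["1", "2"]), ("a", ["x"])]), ("other", [])]

def Spec_calculate_new_travis_env (groups : List (String × List (String × List String))) (out : List String) : Prop := out = calculate_new_travis_env_alt groups
instance (groups : List (String × List (String × List String))) (out : List String) : Decidable (Spec_calculate_new_travis_env groups out) := by unfold Spec_calculate_new_travis_env; infer_instance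

-- ===== CLAIM (what is proved, stated in full; the proofs are below) =====
def Claim_equal_calculate_new_travis_env : Prop := ∀ (groups : List (String × List (String × List String))), Dom_calculate_new_travis_env groups → Pre_calculate_new_travis_env groups → Spec_calculate_new_travis_env groups (calculate_new_travis_env groups)

-- ===== LEMMAS AND PROOFS =====

-- the joined line A makes of a token combination
def pvJoin (c : List (String × String)) : String :=
  PySem.Str.join " " (c.map (fun kv => pvFmt kv.1 kv.2))

-- suffix-recursive characterisation of itertools.product's combination list
def pvSections : List (List (String × String)) → List (List (String × String))
  | [] => [[]]
  | l :: ls => l.flatMap (fun x => (pvSections ls).map (x :: ·))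

theorem pv_prod_fold (ls : List (List (String × String))) (cs : List (List (String × String))) :
    ls.foldl (fun acc l => acc.flatMap (fun c => l.map (fun x => c ++ [x]))) cs
    = cs.flatMap (fun c => (pvSections ls).map (c ++ ·)) := by
  induction ls generalizing cs with
  | nil => simp [pvSections]
  | cons l ls ih =>
    simp only [List.foldl_cons, ih, pvSections]
    simp [List.flatMap_assoc, List.map_flatMap, List.flatMap_map, List.map_map, Function.comp_def]

theorem pv_product_eq_sections (ls : List (List (String × String))) :
    pvProduct ls = pvSections ls := by
  simp [pvProduct, pv_prod_fold]

theorem pvFmt_toList (k v : String) : (pvFmt k v).toList = k.toList ++ '=' :: v.toList := by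
  simp [pvFmt, PySem.Str.toList_join, PySem.Chars.join_cons_cons, PySem.Chars.join_singleton]

theorem pvJoin_cons_ne_empty (kv : String × String) (t : List (String × String)) :
    pvJoin (kv :: t) ≠ "" := by
  intro h
  have h' : (pvJoin (kv :: t)).toList = [] := by rw [h]; rfl
  cases t with
  | nil =>
    simp only [pvJoin, List.map_cons, List.map_nil] at h'
    rw [show PySem.Str.join " " [pvFmt kv.1 kv.2] = pvFmt kv.1 kv.2 from
      String.toList_inj.mp (by simp [PySem.Str.toList_join, PySem.Chars.join_singleton])] at h'
    rw [pvFmt_toList] at h'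
    simp at h'
  | cons kv' t' =>
    simp only [pvJoin, List.map_cons] at h'
    rw [show (PySem.Str.join " " (pvFmt kv.1 kv.2 :: pvFmt kv'.1 kv'.2 :: t'.map (fun kv => pvFmt kv.1 kv.2))).toList
        = (pvFmt kv.1 kv.2).toList ++ ' ' :: (PySem.Str.join " " (pvFmt kv'.1 kv'.2 :: t'.map (fun kv => pvFmt kv.1 kv.2))).toList from
      by simp [PySem.Str.toList_join, PySem.Chars.join_cons_cons]] at h'
    rw [pvFmt_toList] at h'
    simp at h'

-- one token glued in front of a joined suffix = B's string-level gluing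
theorem pv_join_cons (k v : String) (c : List (String × String)) :
    pvJoin ((k, v) :: c)
    = PySem.Str.join "" [pvFmt k v, if pvJoin c = "" then "" else PySem.Str.join "" [" ", pvJoin c]] := by
  cases c with
  | nil =>
    simp only [pvJoin, List.map_cons, List.map_nil]
    rw [show PySem.Str.join " " ([] : List String) = "" from rfl, if_pos rfl]
    exact String.toList_inj.mp (by
      simp [PySem.Str.toList_join, PySem.Chars.join_singleton, PySem.Chars.join_cons_cons])
  | cons kv t =>
    rw [if_neg (pvJoin_cons_ne_empty kv t)]
    apply String.toList_inj.mp
    simp only [pvJoin, List.map_cons]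
    simp [PySem.Str.toList_join, PySem.Chars.join_cons_cons, PySem.Chars.join_singleton]

-- B's recursion = join of the suffix-recursive combination list
theorem pv_lines_eq (items : List (String × List String)) :
    pvLines items
    = (pvSections (items.map (fun p => p.2.map (fun v => (p.1, v))))).map pvJoin := by
  induction items with
  | nil => rfl
  | cons p rest ih =>
    simp only [pvLines, ih, List.map_cons, pvSections, List.map_flatMap, List.flatMap_map,
      List.map_map, Function.comp_def]
    refine List.flatMap_congr (fun v _ => ?_)
    refine List.map_congr_left (fun c _ => ?_)
    exact (pv_join_cons p.1 v c).symm

-- first-match lookup in a Nodup-keyed association list returns the pair's own value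
theorem pv_find?_of_nodup (d : List (String × List String))
    (hn : (d.map (·.1)).Nodup) (p : String × List String) (hp : p ∈ d) :
    d.find? (fun q => q.1 == p.1) = some p := by
  induction d with
  | nil => cases hp
  | cons q t ih =>
    simp only [List.map_cons, List.nodup_cons] at hn
    rcases List.mem_cons.mp hp with rfl | hpt
    · simp [List.find?]
    · have hne : (q.1 == p.1) = false := by
        simp only [beq_eq_false_iff_ne]
        intro h
        exact hn.1 (h ▸ List.mem_map_of_mem hpt)
      simp [List.find?, hne, ih hn.2 hpt]

-- sorting the keys = keys of the by-key-sorted items, when keys are Nodup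
theorem pv_sorted_keys (d : List (String × List String)) (hn : (d.map (·.1)).Nodup) :
    PySem.List.sorted (d.map (·.1)) id = (PySem.List.sorted d (·.1)).map (·.1) := by
  apply PySem.List.sorted_eq_of_perm_of_pairwise_lt
  · exact (PySem.List.sorted_perm d (·.1) false).map (·.1)
  · have hnd : ((PySem.List.sorted d (·.1)).map (·.1)).Nodup :=
      (((PySem.List.sorted_perm d (·.1) false).map (·.1)).nodup_iff).mpr hn
    have hle := PySem.List.sorted_map_key_pairwise d (·.1)
    exact (hle.and hnd).imp (fun h => lt_of_le_of_ne h.1 h.2)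

-- one group: A's product-then-join lines = B's suffix-recursion lines
theorem pv_group_eq (d : List (String × List String)) (hn : (d.map (·.1)).Nodup) :
    (pvProduct ((PySem.List.sorted (d.map (·.1)) id).map
        (fun k => (pvGetItem d k).map (fun v => (k, v))))).map
      (fun p => PySem.Str.join " " (p.map (fun kv => pvFmt kv.1 kv.2)))
    = pvLines (PySem.List.sorted d (·.1)) := by
  rw [pv_sorted_keys d hn, List.map_map]
  have hmem : ∀ p ∈ PySem.List.sorted d (·.1),
      ((fun k => (pvGetItem d k).map (fun v => (k, v))) ∘ (·.1)) p
        = p.2.map (fun v => (p.1, v)) := by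
    intro p hp
    have hpd : p ∈ d := (PySem.List.sorted_perm d (·.1) false).mem_iff.mp hp
    simp [pvGetItem, pv_find?_of_nodup d hn p hpd]
  have hJ : (fun p : List (String × String) =>
      PySem.Str.join " " (p.map (fun kv => pvFmt kv.1 kv.2))) = pvJoin := rfl
  rw [List.map_congr_left hmem, pv_product_eq_sections, hJ, ← pv_lines_eq]

-- sorting after every append = appending everything, then one sort
theorem pv_sort_fold {α : Type} (f : α → List String) (L : List α) (acc : List String) :
    L.foldl (fun e g => PySem.List.sorted (e ++ f g) id) (PySem.List.sorted acc id)
    = PySem.List.sorted (L.foldl (fun e g => e ++ f g) acc) id := by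
  induction L generalizing acc with
  | nil => rfl
  | cons l t ih =>
    simp only [List.foldl_cons]
    rw [PySem.List.sorted_eq_sorted_of_perm (PySem.List.sorted acc id ++ f l) (acc ++ f l) id
        (fun _ _ h => h) ((PySem.List.sorted_perm acc id false).append_right (f l)), ih]

-- ===== VERDICT (by name: the statement is the Claim_ definition above) =====
theorem calculate_new_travis_env_spec : Claim_equal_calculate_new_travis_env := by
  intro groups _ hpre
  unfold Spec_calculate_new_travis_env calculate_new_travis_env calculate_new_travis_env_alt
  rw [PySem.List.foldl_congr_mem groups _
    (fun new_env g => PySem.List.sorted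
      (new_env ++ pvLines (PySem.List.sorted g.2 (·.1))) id) []
    (by
      intro acc g hg
      simp only
      rw [pv_group_eq g.2 (hpre.2 g hg)])]
  exact pv_sort_fold (fun g => pvLines (PySem.List.sorted g.2 (·.1))) groups []
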